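-- pv_equiv track=rewrite | github.com/devsecblueprint/devsecblueprint | backend/handlers/refresh.py | _extract_cookie
-- ===== SOURCE A (Python) =====
-- def _extract_cookie(headers: dict, name: str) -> str | None:
--     """Extract a named cookie value from request headers."""
--     cookie_header = headers.get("cookie", "") or headers.get("Cookie", "")
--     if not cookie_header:
--         return None
--     for cookie in cookie_header.split(";"):
--         cookie = cookie.strip()
--         if "=" in cookie:
--             cname, cvalue = cookie.split("=", 1)
--             if cname.strip() == name:
--                 return cvalue.strip()
--     return None
-- ===== SOURCE B (Python) =====
-- def _extract_cookie(headers: dict, name: str) -> str | None: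
--     """Extract a named cookie value from request headers."""
--     header = headers.get("cookie", "") or headers.get("Cookie", "")
--     cookies = {}
--     for raw in header.split(";"):
--         cname, sep, cvalue = raw.strip().partition("=")
--         if sep:
--             cookies.setdefault(cname.strip(), cvalue.strip())
--     return cookies.get(name)
-- ===== Notes on version B (the rewrite author's own statement) =====
-- stated objective: idiomatic
-- what changed: Instead of scanning pieces for the target name with an early return, B parses every piece with str.partition and builds a dict of all cookies (setdefault, so the first occurrence of a name wins), then answers with a single dict.get lookup.
import Mathlib
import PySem

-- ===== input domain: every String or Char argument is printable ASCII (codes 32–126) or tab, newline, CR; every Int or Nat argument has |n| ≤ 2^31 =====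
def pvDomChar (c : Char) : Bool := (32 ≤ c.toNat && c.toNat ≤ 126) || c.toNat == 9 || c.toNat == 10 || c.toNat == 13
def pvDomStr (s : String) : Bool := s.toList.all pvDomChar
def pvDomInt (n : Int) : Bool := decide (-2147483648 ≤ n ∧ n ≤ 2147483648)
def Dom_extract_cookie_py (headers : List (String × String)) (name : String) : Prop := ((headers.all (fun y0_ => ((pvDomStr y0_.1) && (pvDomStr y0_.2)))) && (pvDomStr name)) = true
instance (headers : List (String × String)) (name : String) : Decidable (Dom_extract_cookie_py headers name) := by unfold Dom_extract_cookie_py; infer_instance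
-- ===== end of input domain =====

-- B parses every piece with partition and builds a dict of all cookies (setdefault: first
-- occurrence of a name wins), then answers with one dict lookup — idiomatic, same O(n) cost.

-- ===== PORT A =====
-- A's for-loop with early return, as structural recursion over the split pieces
def pvLoopA (name : String) : List String → Option String
  | [] => none
  | piece :: rest =>
    let cookie := PySem.Str.strip piece
    if PySem.Str.isIn "=" cookie then
      match PySem.Str.splitMax? cookie "=" 1 with
      | some [cname, cvalue] =>
        if PySem.Str.strip cname = name then some (PySem.Str.strip cvalue)
        else pvLoopA name rest
      | _ => pvLoopA name rest
    else pvLoopA name rest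

def extract_cookie_py (headers : List (String × String)) (name : String) : Option String :=
  let d := PySem.Dict.ofList headers
  let c0 := d.getD "cookie" ""
  let cookie_header := if c0 ≠ "" then c0 else d.getD "Cookie" ""
  if cookie_header = "" then none
  else pvLoopA name ((PySem.Str.split? cookie_header ";").getD [])

-- ===== PORT B =====
-- hand port of s.partition("="): exact, since str.partition and str.split("=", 1) cut the
-- string at the same (first) occurrence of "=", and split returns a pair iff "=" occurs
def pvPartition (s : String) : String × String × String :=
  match PySem.Str.splitMax? s "=" 1 with
  | some [a, b] => (a, "=", b)
  | _ => (s, "", "")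

-- B's loop body: record the piece's cookie into the dict (setdefault: first wins)
def pvAddCookie (d : PySem.Dict String String) (raw : String) : PySem.Dict String String :=
  let t := pvPartition (PySem.Str.strip raw)
  if t.2.1 ≠ "" then d.setdefault (PySem.Str.strip t.1) (PySem.Str.strip t.2.2) else d

def extract_cookie_py_alt (headers : List (String × String)) (name : String) : Option String :=
  let hd := PySem.Dict.ofList headers
  let c0 := hd.getD "cookie" ""
  let header := if c0 ≠ "" then c0 else hd.getD "Cookie" ""
  let cookies := ((PySem.Str.split? header ";").getD []).foldl pvAddCookie PySem.Dict.empty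
  cookies.get? name

-- ===== PRECONDITION & SPEC =====
def Spec_extract_cookie_py (headers : List (String × String)) (name : String) (out : Option String) : Prop := out = extract_cookie_py_alt headers name
instance (headers : List (String × String)) (name : String) (out : Option String) : Decidable (Spec_extract_cookie_py headers name out) := by unfold Spec_extract_cookie_py; infer_instance

-- ===== CLAIM =====
def Claim_equal_extract_cookie_py : Prop := ∀ (headers : List (String × String)) (name : String), Dom_extract_cookie_py headers name → Spec_extract_cookie_py headers name (extract_cookie_py headers name)

-- ===== LEMMAS AND PROOFS =====

-- the value a single piece contributes under A's scan (none if it does not name-match)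
def pvHit (name piece : String) : Option String :=
  let p := PySem.Str.strip piece
  if PySem.Str.isIn "=" p then
    match PySem.Str.splitMax? p "=" 1 with
    | some [cname, cvalue] =>
      if PySem.Str.strip cname = name then some (PySem.Str.strip cvalue) else none
    | _ => none
  else none

lemma pvLoopA_cons (name p : String) (rest : List String) :
    pvLoopA name (p :: rest) = ((pvHit name p).or (pvLoopA name rest)) := by
  conv_lhs => rw [pvLoopA]
  unfold pvHit
  dsimp only
  split_ifs with h
  · rcases hs : PySem.Str.splitMax? (PySem.Str.strip p) "=" 1 with _ | l
    · simp
    · match l with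
      | [] => simp
      | [a] => simp
      | [a, b] => dsimp only; split_ifs <;> simp
      | a :: b :: c :: t => simp
  · simp

-- splitOnMax.go on a list not containing the separator character just copies the list
lemma pvGo_no_sep : ∀ (fuel : Nat) (l cur : List Char) (acc : List (List Char)),
    l.length < fuel → '=' ∉ l →
    PySem.Chars.splitOnMax.go ['='] fuel 1 l cur acc = ((cur.reverse ++ l) :: acc).reverse := by
  intro fuel
  induction fuel with
  | zero => intro l cur acc h; omega
  | succ n ih =>
    intro l cur acc hlen hmem
    cases l with
    | nil => simp [PySem.Chars.splitOnMax.go]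
    | cons c rest =>
      have hc : ¬ ('=' == c) = true := by
        simp only [beq_iff_eq]
        intro h; exact hmem (h ▸ List.mem_cons_self)
      have hrest : '=' ∉ rest := fun h => hmem (List.mem_cons_of_mem _ h)
      simp only [PySem.Chars.splitOnMax.go, List.isPrefixOf, Bool.and_eq_true, hc]
      rw [ih rest (c :: cur) acc (by simpa using Nat.lt_of_succ_lt_succ hlen) hrest]
      simp

-- s.split("=", 1) on a string without "=" returns [s]
lemma pvSplit_no_eq (q : String) (h : PySem.Str.isIn "=" q = false) :
    PySem.Str.splitMax? q "=" 1 = some [q] := by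
  have hmem : '=' ∉ q.toList := by
    have h' : ¬ (['='] <:+: q.toList) :=
      (PySem.Chars.isIn_eq_false_iff _ _).mp (by simpa using h)
    intro hm
    obtain ⟨s, t, hst⟩ := List.append_of_mem hm
    exact h' ⟨s, t, by simp [hst]⟩
  have hg := pvGo_no_sep (q.toList.length + 1) q.toList [] [] (Nat.lt_succ_self _) hmem
  unfold PySem.Str.splitMax? PySem.Chars.splitMax? PySem.Chars.splitOnMax
  norm_num
  exact ⟨[q.toList], ⟨by simp, by simpa using hg⟩, q.toList, rfl, by simp⟩

lemma pvOr_some (x : Option String) (v : String) : x.or (some v) = some (x.getD v) := by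
  cases x <;> simp

-- one step of B's dict-building loop, seen through a lookup at name
lemma pvAddCookie_get? (name : String) (d : PySem.Dict String String) (p : String) :
    (pvAddCookie d p).get? name = (d.get? name).or (pvHit name p) := by
  unfold pvAddCookie pvPartition pvHit
  dsimp only
  rcases hs : PySem.Str.splitMax? (PySem.Str.strip p) "=" 1 with _ | l
  · by_cases hin : PySem.Str.isIn "=" (PySem.Str.strip p)
    · simp
    · rw [pvSplit_no_eq _ (by simpa using hin)] at hs; cases hs
  · match l with
    | [] =>
      by_cases hin : PySem.Str.isIn "=" (PySem.Str.strip p)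
      · simp
      · rw [pvSplit_no_eq _ (by simpa using hin)] at hs; cases hs
    | [a] =>
      by_cases hin : PySem.Str.isIn "=" (PySem.Str.strip p)
      · simp
      · simp [Bool.eq_false_iff.mp (by simpa using hin)]
    | [a, b] =>
      have hin : PySem.Str.isIn "=" (PySem.Str.strip p) = true := by
        by_contra hc
        rw [pvSplit_no_eq _ (by simpa using hc)] at hs
        cases hs
      simp only [hin, String.reduceEq, ne_eq, not_false_iff, if_pos]
      by_cases hname : PySem.Str.strip a = name
      · rw [hname, PySem.Dict.get?_setdefault_self, if_pos rfl, pvOr_some]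
      · rw [PySem.Dict.get?_setdefault_of_ne _ _ (fun hh => hname hh.symm), if_neg hname,
          Option.or_none]
    | a :: b :: c :: t =>
      by_cases hin : PySem.Str.isIn "=" (PySem.Str.strip p)
      · simp
      · rw [pvSplit_no_eq _ (by simpa using hin)] at hs; cases hs

-- B's whole dict-building loop, seen through a lookup at name, is A's scan
lemma pvFold_get? (name : String) : ∀ (ps : List String) (d : PySem.Dict String String),
    (ps.foldl pvAddCookie d).get? name = (d.get? name).or (pvLoopA name ps) := by
  intro ps
  induction ps with
  | nil => intro d; simp [pvLoopA]
  | cons p rest ih =>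
    intro d
    rw [List.foldl_cons, ih, pvAddCookie_get?, pvLoopA_cons, Option.or_assoc]

-- ===== VERDICT =====
theorem extract_cookie_py_spec : Claim_equal_extract_cookie_py := by
  intro headers name _
  unfold Spec_extract_cookie_py extract_cookie_py extract_cookie_py_alt
  simp only []
  set d := PySem.Dict.ofList headers
  set c0 := d.getD "cookie" ""
  set ch := if c0 ≠ "" then c0 else d.getD "Cookie" "" with hch
  by_cases h : ch = ""
  · rw [h]
    have hsplit : PySem.Str.split? "" ";" = some [""] := by decide
    rw [hsplit]
    simp only [Option.getD_some]
    have hfold : (([""] : List String).foldl pvAddCookie PySem.Dict.empty) = PySem.Dict.empty := by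
      decide
    simp only [if_true, hfold, PySem.Dict.get?_empty]
  · rw [if_neg h, pvFold_get? name, PySem.Dict.get?_empty, Option.none_or]
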